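-- pv_equiv track=rewrite | github.com/ooyejinn/algorithm | 백준/Gold/10711. 모래성/모래성.py | sandcastle
-- ===== SOURCE A (Python) =====
-- from collections import deque
--
-- dr = [1, 1, 1, -1, -1, -1, 0, 0]
--
-- dc = [-1, 0, 1, -1, 0, 1, -1, 1]
--
-- def sandcastle(N, M, arr):
--     Q = deque()
--
--     # 초기 상태 설정 및 모래가 없는 위치 큐에 추가
--     for r in range(N):
--         for c in range(M):
--             if arr[r][c] == '.':
--                 arr[r][c] = 0
--                 Q.append((r, c, 0))
--             else:
--                 arr[r][c] = int(arr[r][c])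
--
--     max_time = 0
--     while Q:
--         r, c, time = Q.popleft()
--         max_time = max(max_time, time)
--
--         for d in range(8):
--             nr, nc = r + dr[d], c + dc[d]
--             if 0 <= nr < N and 0 <= nc < M and arr[nr][nc] != 0:
--                 arr[nr][nc] -= 1
--                 if arr[nr][nc] == 0:
--                     Q.append((nr, nc, time + 1))
--
--     return max_time
-- ===== SOURCE B (Python) =====
-- # Level-synchronous erosion: per round, count frontier hits per standing cell
-- # and collapse in bulk (v <= hits), instead of A's timestamped FIFO queue of
-- # single-cell decrements.  Return value only: unlike A, B does not mutate arr.
-- DIRS = ((1, -1), (1, 0), (1, 1), (-1, -1), (-1, 0), (-1, 1), (0, -1), (0, 1))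
--
-- def sandcastle(N, M, arr):
--     grid = {}
--     frontier = []
--     for r in range(N):
--         for c in range(M):
--             s = arr[r][c]
--             if s == '.':
--                 grid[(r, c)] = 0
--                 frontier.append((r, c))
--             else:
--                 grid[(r, c)] = int(s)
--     t = 0
--     last = 0
--     while frontier:
--         last = max(last, t)
--         hits = {}
--         for (r, c) in frontier:
--             for (a, b) in DIRS:
--                 nr, nc = r + a, c + b
--                 if 0 <= nr < N and 0 <= nc < M and grid[(nr, nc)] > 0:
--                     hits[(nr, nc)] = hits.get((nr, nc), 0) + 1
--         frontier = []
--         for p, k in hits.items():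
--             v = grid[p]
--             if v <= k:
--                 grid[p] = 0
--                 frontier.append(p)
--             else:
--                 grid[p] = v - k
--         t += 1
--     return last
-- ===== Notes on version B (the rewrite author's own statement) =====
-- stated objective: alternative
-- what changed: A's timestamped FIFO deque of single-cell decrements is replaced by a round-synchronous frontier sweep: each round counts, per standing cell, how many neighbours collapsed last round (a hits dict) and collapses/subtracts in bulk, returning the number of the last collapsing round; B reads arr without mutating it.
import Mathlib
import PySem

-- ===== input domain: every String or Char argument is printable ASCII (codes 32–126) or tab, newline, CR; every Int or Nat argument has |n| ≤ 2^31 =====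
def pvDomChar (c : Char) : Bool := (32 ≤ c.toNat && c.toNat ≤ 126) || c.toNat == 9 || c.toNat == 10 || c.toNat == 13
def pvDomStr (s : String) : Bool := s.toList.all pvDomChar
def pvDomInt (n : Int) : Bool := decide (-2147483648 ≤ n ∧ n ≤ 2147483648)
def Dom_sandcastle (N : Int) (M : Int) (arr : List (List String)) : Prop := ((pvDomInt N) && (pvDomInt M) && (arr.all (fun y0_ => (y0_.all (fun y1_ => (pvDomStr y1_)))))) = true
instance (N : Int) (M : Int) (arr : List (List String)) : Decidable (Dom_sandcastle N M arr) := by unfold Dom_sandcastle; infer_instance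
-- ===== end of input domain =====

-- B replaces A's timestamped FIFO queue of one-step decrements by round-synchronous
-- bulk collapse (count the frontier hits of each standing cell, subtract once);
-- equivalence is about the RETURN value only: A rewrites arr in place, B leaves arr untouched.

-- ===== PORT A =====
-- the 2D array (after the int conversion of the first loop) is modeled as a total
-- function (Int × Int) → Int; every read/write of A is bounds-checked, so this is exact.
def pvDr : List Int := [1, 1, 1, -1, -1, -1, 0, 0]
def pvDc : List Int := [-1, 0, 1, -1, 0, 1, -1, 1]

-- body of `for d in range(8): ...` for one popped cell (r, c, time)
def pvStepA (N M : Int) (st0 : ((Int × Int) → Int) × List (Int × Int × Int))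
    (r c time : Int) : ((Int × Int) → Int) × List (Int × Int × Int) :=
  (PySem.List.pyRange 0 8 1).foldl (fun st d =>
    let nr := r + (PySem.List.pyGet? pvDr d).getD 0
    let nc := c + (PySem.List.pyGet? pvDc d).getD 0
    if 0 ≤ nr ∧ nr < N ∧ 0 ≤ nc ∧ nc < M ∧ st.1 (nr, nc) ≠ 0 then
      let v' := st.1 (nr, nc) - 1
      ((fun p => if p = (nr, nc) then v' else st.1 p),
       if v' = 0 then st.2 ++ [(nr, nc, time + 1)] else st.2)
    else st) st0

-- `while Q: ...` (fuel bounds the number of pops; proved sufficient below)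
def pvRunA (fuel : Nat) (N M : Int) (g : (Int × Int) → Int)
    (Q : List (Int × Int × Int)) (mt : Int) : Int :=
  match fuel, Q with
  | _, [] => mt
  | 0, _ => mt
  | fuel + 1, (r, c, time) :: rest =>
    let mt' := max mt time
    let st := pvStepA N M (g, []) r c time
    pvRunA fuel N M st.1 (rest ++ st.2) mt'

-- the initial double loop: convert entries, queue the empty cells with time 0
def pvParseA (N M : Int) (arr : List (List String)) :
    ((Int × Int) → Int) × List (Int × Int × Int) :=
  (PySem.List.pyRange 0 N 1).foldl (fun st r =>
    (PySem.List.pyRange 0 M 1).foldl (fun st c =>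
      let s := (PySem.List.pyGet? ((PySem.List.pyGet? arr r).getD []) c).getD ""
      if s = "." then
        ((fun p => if p = (r, c) then 0 else st.1 p), st.2 ++ [(r, c, (0 : Int))])
      else
        ((fun p => if p = (r, c) then (PySem.Int.ofStr? s).getD 0 else st.1 p), st.2))
      st) ((fun _ => 0), [])

def sandcastle (N : Int) (M : Int) (arr : List (List String)) : Int :=
  let st := pvParseA N M arr
  pvRunA (st.2.length + 2 * (N.toNat * M.toNat) + 1) N M st.1 st.2 0

-- ===== PORT B =====
def pvDirs : List (Int × Int) :=
  [(1, -1), (1, 0), (1, 1), (-1, -1), (-1, 0), (-1, 1), (0, -1), (0, 1)]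

-- the `hits` dict is modeled as (insertion-ordered key list, count function);
-- body of the counting loop for one frontier cell rc
def pvCountB (N M : Int) (g : (Int × Int) → Int)
    (st0 : List (Int × Int) × ((Int × Int) → Int)) (rc : Int × Int) :
    List (Int × Int) × ((Int × Int) → Int) :=
  pvDirs.foldl (fun st ab =>
    let nr := rc.1 + ab.1
    let nc := rc.2 + ab.2
    if 0 ≤ nr ∧ nr < N ∧ 0 ≤ nc ∧ nc < M ∧ 0 < g (nr, nc) then
      ((if (nr, nc) ∈ st.1 then st.1 else st.1 ++ [(nr, nc)]),
       (fun q => if q = (nr, nc) then st.2 (nr, nc) + 1 else st.2 q))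
    else st) st0

-- one round: count all hits, then collapse / subtract in bulk per hit cell
def pvRoundB (N M : Int) (g : (Int × Int) → Int) (F : List (Int × Int)) :
    List (Int × Int) × ((Int × Int) → Int) :=
  let hs := F.foldl (pvCountB N M g) ([], fun _ => 0)
  hs.1.foldl (fun st p =>
    let v := st.2 p
    if v ≤ hs.2 p then ((st.1 ++ [p]), (fun q => if q = p then 0 else st.2 q))
    else (st.1, (fun q => if q = p then v - hs.2 p else st.2 q))) ([], g)

-- `while frontier: ...` over rounds
def pvRunB (fuel : Nat) (N M : Int) (g : (Int × Int) → Int)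
    (F : List (Int × Int)) (t last : Int) : Int :=
  match fuel, F with
  | _, [] => last
  | 0, _ => last
  | fuel + 1, q :: rest =>
    let last' := max last t
    let st := pvRoundB N M g (q :: rest)
    pvRunB fuel N M st.2 st.1 (t + 1) last'

def pvParseB (N M : Int) (arr : List (List String)) :
    ((Int × Int) → Int) × List (Int × Int) :=
  (PySem.List.pyRange 0 N 1).foldl (fun st r =>
    (PySem.List.pyRange 0 M 1).foldl (fun st c =>
      let s := (PySem.List.pyGet? ((PySem.List.pyGet? arr r).getD []) c).getD ""
      if s = "." then
        ((fun p => if p = (r, c) then 0 else st.1 p), st.2 ++ [(r, c)])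
      else
        ((fun p => if p = (r, c) then (PySem.Int.ofStr? s).getD 0 else st.1 p), st.2))
      st) ((fun _ => 0), [])

def sandcastle_alt (N : Int) (M : Int) (arr : List (List String)) : Int :=
  let st := pvParseB N M arr
  pvRunB (N.toNat * M.toNat + 2) N M st.1 st.2 0 0

-- ===== PRECONDITION & SPEC =====
-- Pre_ excludes exactly the raising inputs: grids whose scanned N×M block is missing
-- (IndexError) or contains an entry that is neither "." nor int()-parsable (ValueError).
def Pre_sandcastle (N : Int) (M : Int) (arr : List (List String)) : Prop :=
  0 < N → 0 < M →
    (N ≤ (arr.length : Int) ∧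
     ∀ row ∈ arr.take N.toNat, M ≤ (row.length : Int) ∧
       ∀ s ∈ row.take M.toNat, s = "." ∨ (PySem.Int.ofStr? s).isSome)
instance (N : Int) (M : Int) (arr : List (List String)) : Decidable (Pre_sandcastle N M arr) := by
  unfold Pre_sandcastle; infer_instance

def pvWitness_sandcastle : Int × Int × List (List String) :=
  (2, 2, [[".", "2"], ["1", "9"]])

def Spec_sandcastle (N : Int) (M : Int) (arr : List (List String)) (out : Int) : Prop := out = sandcastle_alt N M arr
instance (N : Int) (M : Int) (arr : List (List String)) (out : Int) : Decidable (Spec_sandcastle N M arr out) := by unfold Spec_sandcastle; infer_instance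

-- ===== CLAIM (what is proved, stated in full; the proofs are below) =====
def Claim_equal_sandcastle : Prop := ∀ (N : Int) (M : Int) (arr : List (List String)), Dom_sandcastle N M arr → Pre_sandcastle N M arr → Spec_sandcastle N M arr (sandcastle N M arr)

-- ===== LEMMAS AND PROOFS =====

-- in-bounds predicate (abbrev so Decidable is found by unfolding)
abbrev pvInB (N M : Int) (p : Int × Int) : Prop :=
  0 ≤ p.1 ∧ p.1 < N ∧ 0 ≤ p.2 ∧ p.2 < M

-- the 8 neighbour cells of rc, and all hit events of a frontier list
def pvHits (rc : Int × Int) : List (Int × Int) :=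
  pvDirs.map (fun ab => (rc.1 + ab.1, rc.2 + ab.2))

def pvEvents (F : List (Int × Int)) : List (Int × Int) := F.flatMap pvHits

-- A's elementary event: one attempted decrement at target p
def pvEvA (N M : Int) (st : ((Int × Int) → Int) × List (Int × Int)) (p : Int × Int) :
    ((Int × Int) → Int) × List (Int × Int) :=
  if 0 ≤ p.1 ∧ p.1 < N ∧ 0 ≤ p.2 ∧ p.2 < M ∧ st.1 p ≠ 0 then
    ((fun q => if q = p then st.1 p - 1 else st.1 q),
     if st.1 p - 1 = 0 then st.2 ++ [p] else st.2)
  else st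

-- B's elementary event: one counted hit at target p
def pvEvC (N M : Int) (g : (Int × Int) → Int)
    (st : List (Int × Int) × ((Int × Int) → Int)) (p : Int × Int) :
    List (Int × Int) × ((Int × Int) → Int) :=
  if 0 ≤ p.1 ∧ p.1 < N ∧ 0 ≤ p.2 ∧ p.2 < M ∧ 0 < g p then
    ((if p ∈ st.1 then st.1 else st.1 ++ [p]),
     (fun q => if q = p then st.2 p + 1 else st.2 q))
  else st

-- net effect on a single cell of value v hit k times (stop at 0, pass through negatives)
def pvApplyK (v : Int) (k : Nat) : Int :=
  if v = 0 then 0 else if 0 < v ∧ v ≤ (k : Int) then 0 else v - k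

-- the A/B grid relation: equal where B is positive, same zero set, negatives stay negative
def pvInv (gA gB : (Int × Int) → Int) : Prop :=
  ∀ p, (0 < gB p → gA p = gB p) ∧ (gB p = 0 → gA p = 0) ∧ (gB p < 0 → gA p < 0)

noncomputable def pvRegion (N M : Int) : Finset (Int × Int) :=
  Finset.Icc 0 (N - 1) ×ˢ Finset.Icc 0 (M - 1)

noncomputable def pvPos (N M : Int) (g : (Int × Int) → Int) : Nat :=
  ((pvRegion N M).filter (fun p => 0 < g p)).card

lemma pvEvA_pos (N M : Int) (g : (Int × Int) → Int) (s : List (Int × Int)) (p : Int × Int)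
    (h : 0 ≤ p.1 ∧ p.1 < N ∧ 0 ≤ p.2 ∧ p.2 < M ∧ g p ≠ 0) :
    pvEvA N M (g, s) p =
      ((fun q => if q = p then g p - 1 else g q), if g p - 1 = 0 then s ++ [p] else s) := by
  rw [pvEvA, if_pos h]

lemma pvEvA_neg (N M : Int) (g : (Int × Int) → Int) (s : List (Int × Int)) (p : Int × Int)
    (h : ¬(0 ≤ p.1 ∧ p.1 < N ∧ 0 ≤ p.2 ∧ p.2 < M ∧ g p ≠ 0)) :
    pvEvA N M (g, s) p = (g, s) := by
  rw [pvEvA, if_neg h]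

lemma pvEvA_acc (N M : Int) : ∀ (L : List (Int × Int)) (g : (Int × Int) → Int) (s : List (Int × Int)),
    L.foldl (pvEvA N M) (g, s) =
      ((L.foldl (pvEvA N M) (g, [])).1, s ++ (L.foldl (pvEvA N M) (g, [])).2) := by
  intro L
  induction L with
  | nil => intro g s; simp
  | cons q L ih =>
    intro g s
    simp only [List.foldl_cons]
    by_cases hc : 0 ≤ q.1 ∧ q.1 < N ∧ 0 ≤ q.2 ∧ q.2 < M ∧ g q ≠ 0
    · rw [pvEvA_pos N M g s q hc, pvEvA_pos N M g [] q hc]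
      by_cases hz : g q - 1 = 0
      · rw [if_pos hz, if_pos hz]
        rw [ih _ (s ++ [q]), ih _ ([] ++ [q])]
        simp
      · rw [if_neg hz, if_neg hz]
        exact ih _ s
    · rw [pvEvA_neg N M g s q hc, pvEvA_neg N M g [] q hc]
      exact ih _ s
lemma pvAfold (N M r c time : Int) : ∀ (ds : List (Int × Int)) (g : (Int × Int) → Int)
    (q : List (Int × Int × Int)),
    ds.foldl (fun (st : ((Int × Int) → Int) × List (Int × Int × Int)) ab =>
      let nr := r + ab.1
      let nc := c + ab.2
      if 0 ≤ nr ∧ nr < N ∧ 0 ≤ nc ∧ nc < M ∧ st.1 (nr, nc) ≠ 0 then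
        let v' := st.1 (nr, nc) - 1
        ((fun p => if p = (nr, nc) then v' else st.1 p),
         if v' = 0 then st.2 ++ [(nr, nc, time + 1)] else st.2)
      else st) (g, q)
    = (((ds.map (fun ab => (r + ab.1, c + ab.2))).foldl (pvEvA N M) (g, [])).1,
       q ++ ((ds.map (fun ab => (r + ab.1, c + ab.2))).foldl (pvEvA N M) (g, [])).2.map
         (fun p => (p.1, p.2, time + 1))) := by
  intro ds
  induction ds with
  | nil => intro g q; simp
  | cons ab ds ih =>
    intro g q
    simp only [List.foldl_cons, List.map_cons]
    by_cases hc : 0 ≤ r + ab.1 ∧ r + ab.1 < N ∧ 0 ≤ c + ab.2 ∧ c + ab.2 < M ∧ g (r + ab.1, c + ab.2) ≠ 0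
    · rw [pvEvA_pos N M g [] (r + ab.1, c + ab.2) hc]
      rw [if_pos hc]
      by_cases hz : g (r + ab.1, c + ab.2) - 1 = 0
      · rw [if_pos hz, if_pos hz,
          pvEvA_acc N M (ds.map (fun ab => (r + ab.1, c + ab.2))) _ ([] ++ [(r + ab.1, c + ab.2)]),
          ih]
        simp
      · rw [if_neg hz, if_neg hz, ih]
    · rw [pvEvA_neg N M g [] (r + ab.1, c + ab.2) hc]
      rw [if_neg hc]
      exact ih g q
lemma pvStepA_eq (N M r c time : Int) (g : (Int × Int) → Int) (q : List (Int × Int × Int)) :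
    pvStepA N M (g, q) r c time =
      (((pvHits (r, c)).foldl (pvEvA N M) (g, [])).1,
       q ++ ((pvHits (r, c)).foldl (pvEvA N M) (g, [])).2.map (fun p => (p.1, p.2, time + 1))) := by
  have h8 : PySem.List.pyRange 0 8 1 = ([0, 1, 2, 3, 4, 5, 6, 7] : List Int) := by decide
  have hm : ([0, 1, 2, 3, 4, 5, 6, 7] : List Int).map
      (fun d => (((PySem.List.pyGet? pvDr d).getD 0 : Int), ((PySem.List.pyGet? pvDc d).getD 0 : Int)))
      = pvDirs := by decide
  have e1 : pvStepA N M (g, q) r c time =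
      pvDirs.foldl (fun (st : ((Int × Int) → Int) × List (Int × Int × Int)) ab =>
        let nr := r + ab.1
        let nc := c + ab.2
        if 0 ≤ nr ∧ nr < N ∧ 0 ≤ nc ∧ nc < M ∧ st.1 (nr, nc) ≠ 0 then
          let v' := st.1 (nr, nc) - 1
          ((fun p => if p = (nr, nc) then v' else st.1 p),
           if v' = 0 then st.2 ++ [(nr, nc, time + 1)] else st.2)
        else st) (g, q) := by
    rw [pvStepA, h8, ← hm, List.foldl_map]
  rw [e1, pvAfold]
  rfl
lemma pvApplyK_zero (k : Nat) : pvApplyK 0 k = 0 := by simp [pvApplyK]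

lemma pvApplyK_zero_count (v : Int) : pvApplyK v 0 = v := by
  unfold pvApplyK
  split_ifs <;> omega

lemma pvApplyK_step (v : Int) (k : Nat) (hv : v ≠ 0) :
    pvApplyK v (k + 1) = if v = 1 then 0 else pvApplyK (v - 1) k := by
  unfold pvApplyK
  split_ifs <;> push_cast at * <;> omega

lemma pvEvA_char (N M : Int) : ∀ (L : List (Int × Int)) (g : (Int × Int) → Int),
    (∀ p, (L.foldl (pvEvA N M) (g, [])).1 p =
        if pvInB N M p then pvApplyK (g p) (L.count p) else g p)
    ∧ (∀ p, p ∈ (L.foldl (pvEvA N M) (g, [])).2 ↔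
        pvInB N M p ∧ 0 < g p ∧ g p ≤ (L.count p : Int))
    ∧ (L.foldl (pvEvA N M) (g, [])).2.Nodup := by
  intro L
  induction L with
  | nil =>
    intro g
    refine ⟨fun p => ?_, fun p => ?_, by simp⟩
    · simp only [List.foldl_nil, List.count_nil, pvApplyK_zero_count]
      simp
    · simp only [List.foldl_nil, List.count_nil]
      simp only [List.not_mem_nil, false_iff]
      push_cast
      rintro ⟨-, h1, h2⟩; omega
  | cons q L ih =>
    intro g
    simp only [List.foldl_cons]
    by_cases hc : 0 ≤ q.1 ∧ q.1 < N ∧ 0 ≤ q.2 ∧ q.2 < M ∧ g q ≠ 0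
    · have hinB : pvInB N M q := ⟨hc.1, hc.2.1, hc.2.2.1, hc.2.2.2.1⟩
      have hne : g q ≠ 0 := hc.2.2.2.2
      rw [pvEvA_pos N M g [] q hc]
      set g' : (Int × Int) → Int := fun p => if p = q then g q - 1 else g p with hg'
      obtain ⟨ih1, ih2, ih3⟩ := ih g'
      by_cases hz : g q - 1 = 0
      · rw [if_pos hz, pvEvA_acc N M L g' ([] ++ [q])]
        have hgq : g q = 1 := by omega
        refine ⟨fun p => ?_, fun p => ?_, ?_⟩
        · rw [ih1 p]
          by_cases hp : p = q
          · subst hp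
            have hz' : g' p = 0 := by simp [hg', hz]
            rw [hz']
            simp only [List.count_cons, beq_self_eq_true, if_true]
            rw [if_pos hinB, if_pos hinB, pvApplyK_zero, pvApplyK_step _ _ hne, if_pos hgq]
          · have he : g' p = g p := by simp [hg', hp]
            rw [he]
            simp only [List.count_cons, beq_iff_eq, if_neg (fun h => hp (Eq.symm h)), add_zero]
        · simp only [List.nil_append, List.cons_append, List.mem_cons]
          by_cases hp : p = q
          · subst hp
            refine iff_of_true (Or.inl rfl) ⟨hinB, by omega, ?_⟩
            simp only [List.count_cons, beq_self_eq_true, if_true]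
            push_cast
            have := Nat.zero_le (L.count p)
            omega
          · have he : g' p = g p := by simp [hg', hp]
            rw [ih2 p, he]
            simp only [List.count_cons, beq_iff_eq, if_neg (fun h => hp (Eq.symm h)), add_zero]
            constructor
            · rintro (h | h); · exact absurd h hp
              exact h
            · exact Or.inr
        · simp only [List.nil_append, List.cons_append]
          refine List.Nodup.cons ?_ ih3
          intro hmem
          have := (ih2 q).1 hmem
          have hz' : g' q = 0 := by simp [hg', hz]
          rw [hz'] at this
          exact absurd this.2.1 (by omega)
      · rw [if_neg hz]
        refine ⟨fun p => ?_, fun p => ?_, ih3⟩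
        · rw [ih1 p]
          by_cases hp : p = q
          · subst hp
            have hgp : g' p = g p - 1 := by simp [hg']
            simp only [List.count_cons, beq_self_eq_true, if_true]
            rw [hgp, if_pos hinB, if_pos hinB, pvApplyK_step _ _ hne,
              if_neg (by omega : ¬ g p = 1)]
          · have he : g' p = g p := by simp [hg', hp]
            rw [he]
            simp only [List.count_cons, beq_iff_eq, if_neg (fun h => hp (Eq.symm h)), add_zero]
        · rw [ih2 p]
          by_cases hp : p = q
          · subst hp
            have hgp : g' p = g p - 1 := by simp [hg']
            rw [hgp]
            simp only [List.count_cons, beq_self_eq_true, if_true]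
            constructor
            · rintro ⟨h1, h2, h3⟩
              refine ⟨h1, by omega, ?_⟩
              push_cast at h3 ⊢
              omega
            · rintro ⟨h1, h2, h3⟩
              refine ⟨h1, by omega, ?_⟩
              push_cast at h3 ⊢
              omega
          · have he : g' p = g p := by simp [hg', hp]
            rw [he]
            simp only [List.count_cons, beq_iff_eq, if_neg (fun h => hp (Eq.symm h)), add_zero]
    · rw [pvEvA_neg N M g [] q hc]
      obtain ⟨ih1, ih2, ih3⟩ := ih g
      refine ⟨fun p => ?_, fun p => ?_, ih3⟩
      · rw [ih1 p]
        by_cases hp : p = q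
        · subst hp
          simp only [List.count_cons, beq_self_eq_true, if_true]
          by_cases hb : pvInB N M p
          · have hz : g p = 0 := by
              by_contra hzz
              exact hc ⟨hb.1, hb.2.1, hb.2.2.1, hb.2.2.2, hzz⟩
            rw [if_pos hb, if_pos hb, hz, pvApplyK_zero, pvApplyK_zero]
          · rw [if_neg hb, if_neg hb]
        · simp only [List.count_cons, beq_iff_eq, if_neg (fun h => hp (Eq.symm h)), add_zero]
      · rw [ih2 p]
        by_cases hp : p = q
        · subst hp
          simp only [List.count_cons, beq_self_eq_true, if_true]
          by_cases hb : pvInB N M p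
          · have hz : g p = 0 := by
              by_contra hzz
              exact hc ⟨hb.1, hb.2.1, hb.2.2.1, hb.2.2.2, hzz⟩
            simp [hz]
          · simp [hb]
        · simp only [List.count_cons, beq_iff_eq, if_neg (fun h => hp (Eq.symm h)), add_zero]
lemma pvCountB_eq (N M : Int) (g : (Int × Int) → Int)
    (st : List (Int × Int) × ((Int × Int) → Int)) (rc : Int × Int) :
    pvCountB N M g st rc = (pvHits rc).foldl (pvEvC N M g) st := by
  rw [pvCountB, pvHits, List.foldl_map]
  rfl

lemma pvCountB_events (N M : Int) (g : (Int × Int) → Int) :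
    ∀ (F : List (Int × Int)) (st : List (Int × Int) × ((Int × Int) → Int)),
    F.foldl (pvCountB N M g) st = (pvEvents F).foldl (pvEvC N M g) st := by
  intro F
  induction F with
  | nil => intro st; rfl
  | cons rc F ih =>
    intro st
    rw [List.foldl_cons, pvCountB_eq, ih]
    conv_rhs => rw [pvEvents, List.flatMap_cons, List.foldl_append]
    rw [pvEvents]

lemma pvEvC_pos (N M : Int) (g h : (Int × Int) → Int) (ks : List (Int × Int)) (p : Int × Int)
    (hc : 0 ≤ p.1 ∧ p.1 < N ∧ 0 ≤ p.2 ∧ p.2 < M ∧ 0 < g p) :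
    pvEvC N M g (ks, h) p =
      ((if p ∈ ks then ks else ks ++ [p]), (fun q => if q = p then h p + 1 else h q)) := by
  rw [pvEvC, if_pos hc]

lemma pvEvC_neg (N M : Int) (g h : (Int × Int) → Int) (ks : List (Int × Int)) (p : Int × Int)
    (hc : ¬(0 ≤ p.1 ∧ p.1 < N ∧ 0 ≤ p.2 ∧ p.2 < M ∧ 0 < g p)) :
    pvEvC N M g (ks, h) p = (ks, h) := by
  rw [pvEvC, if_neg hc]

lemma pvEvC_char (N M : Int) (g : (Int × Int) → Int) :
    ∀ (L : List (Int × Int)) (ks : List (Int × Int)) (h : (Int × Int) → Int),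
    (∀ p, (L.foldl (pvEvC N M g) (ks, h)).2 p =
        h p + if pvInB N M p ∧ 0 < g p then (L.count p : Int) else 0)
    ∧ (∀ p, p ∈ (L.foldl (pvEvC N M g) (ks, h)).1 ↔
        p ∈ ks ∨ (pvInB N M p ∧ 0 < g p ∧ p ∈ L))
    ∧ (ks.Nodup → (L.foldl (pvEvC N M g) (ks, h)).1.Nodup) := by
  intro L
  induction L with
  | nil =>
    intro ks h
    refine ⟨fun p => ?_, fun p => ?_, fun hn => hn⟩
    · simp
    · simp
  | cons q L ih =>
    intro ks h
    simp only [List.foldl_cons]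
    by_cases hc : 0 ≤ q.1 ∧ q.1 < N ∧ 0 ≤ q.2 ∧ q.2 < M ∧ 0 < g q
    · have hinB : pvInB N M q := ⟨hc.1, hc.2.1, hc.2.2.1, hc.2.2.2.1⟩
      have hpos : 0 < g q := hc.2.2.2.2
      rw [pvEvC_pos N M g h ks q hc]
      set ks' := if q ∈ ks then ks else ks ++ [q] with hks'
      set h' : (Int × Int) → Int := fun p => if p = q then h q + 1 else h p with hh'
      obtain ⟨ih1, ih2, ih3⟩ := ih ks' h'
      refine ⟨fun p => ?_, fun p => ?_, fun hn => ?_⟩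
      · rw [ih1 p]
        by_cases hp : p = q
        · subst hp
          have he : h' p = h p + 1 := by simp [hh']
          rw [he]
          simp only [List.count_cons, beq_self_eq_true, if_true,
            if_pos (And.intro hinB hpos)]
          push_cast
          ring
        · have he : h' p = h p := by simp [hh', hp]
          rw [he]
          simp only [List.count_cons, beq_iff_eq, if_neg (fun hh => hp (Eq.symm hh)), add_zero]
      · rw [ih2 p]
        by_cases hp : p = q
        · subst hp
          have hmem : p ∈ ks' := by
            rw [hks']
            by_cases hin : p ∈ ks
            · rw [if_pos hin]; exact hin
            · rw [if_neg hin]; exact List.mem_append_right ks (List.mem_singleton.mpr rfl)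
          exact iff_of_true (Or.inl hmem) (Or.inr ⟨hinB, hpos, List.mem_cons_self ..⟩)
        · rw [hks']
          by_cases hin : q ∈ ks
          · rw [if_pos hin]
            simp [hp]
          · rw [if_neg hin]
            simp [hp]
      · refine ih3 ?_
        rw [hks']
        by_cases hin : q ∈ ks
        · rw [if_pos hin]; exact hn
        · rw [if_neg hin]
          exact List.Nodup.append hn (List.nodup_singleton q)
            (List.disjoint_singleton.mpr hin)
    · rw [pvEvC_neg N M g h ks q hc]
      obtain ⟨ih1, ih2, ih3⟩ := ih ks h
      refine ⟨fun p => ?_, fun p => ?_, ih3⟩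
      · rw [ih1 p]
        by_cases hp : p = q
        · subst hp
          have hng : ¬(pvInB N M p ∧ 0 < g p) := by
            rintro ⟨hb, hg⟩
            exact hc ⟨hb.1, hb.2.1, hb.2.2.1, hb.2.2.2, hg⟩
          rw [if_neg hng, if_neg hng]
        · simp only [List.count_cons, beq_iff_eq, if_neg (fun hh => hp (Eq.symm hh)), add_zero]
      · rw [ih2 p]
        by_cases hp : p = q
        · subst hp
          have hng : ¬(pvInB N M p ∧ 0 < g p) := by
            rintro ⟨hb, hg⟩
            exact hc ⟨hb.1, hb.2.1, hb.2.2.1, hb.2.2.2, hg⟩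
          simp only [List.mem_cons]
          constructor
          · rintro (hh | hh); · exact Or.inl hh
            exact Or.inr ⟨hh.1, hh.2.1, Or.inr hh.2.2⟩
          · rintro (hh | hh); · exact Or.inl hh
            rcases hh.2.2 with hh2 | hh2
            · exact absurd ⟨hh.1, hh.2.1⟩ hng
            · exact Or.inr ⟨hh.1, hh.2.1, hh2⟩
        · simp only [List.mem_cons]
          constructor
          · rintro (hh | hh); · exact Or.inl hh
            exact Or.inr ⟨hh.1, hh.2.1, Or.inr hh.2.2⟩
          · rintro (hh | hh); · exact Or.inl hh
            rcases hh.2.2 with hh2 | hh2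
            · exact absurd hh2 hp
            · exact Or.inr ⟨hh.1, hh.2.1, hh2⟩
lemma pvApplyB_char (h : (Int × Int) → Int) :
    ∀ (ks : List (Int × Int)) (g g' : (Int × Int) → Int) (acc : List (Int × Int)),
    ks.Nodup → (∀ p ∈ ks, g' p = g p) →
    (ks.foldl (fun (st : List (Int × Int) × ((Int × Int) → Int)) p =>
        let v := st.2 p
        if v ≤ h p then ((st.1 ++ [p]), (fun q => if q = p then 0 else st.2 q))
        else (st.1, (fun q => if q = p then v - h p else st.2 q))) (acc, g')).1
      = acc ++ ks.filter (fun p => g p ≤ h p)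
    ∧ ∀ p, (ks.foldl (fun (st : List (Int × Int) × ((Int × Int) → Int)) p =>
        let v := st.2 p
        if v ≤ h p then ((st.1 ++ [p]), (fun q => if q = p then 0 else st.2 q))
        else (st.1, (fun q => if q = p then v - h p else st.2 q))) (acc, g')).2 p
      = if p ∈ ks then (if g p ≤ h p then 0 else g p - h p) else g' p := by
  intro ks
  induction ks with
  | nil =>
    intro g g' acc _ _
    refine ⟨by simp, fun p => by simp⟩
  | cons k ks ih =>
    intro g g' acc hnd hagree
    have hk : g' k = g k := hagree k (List.mem_cons_self ..)
    have hnotin : k ∉ ks := (List.nodup_cons.mp hnd).1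
    have hnd' : ks.Nodup := (List.nodup_cons.mp hnd).2
    simp only [List.foldl_cons]
    by_cases hle : g' k ≤ h k
    · rw [if_pos hle]
      set g'' : (Int × Int) → Int := fun q => if q = k then 0 else g' q with hg''
      have hagree' : ∀ p ∈ ks, g'' p = g p := by
        intro p hp
        have : p ≠ k := fun he => hnotin (he ▸ hp)
        simp only [hg'', if_neg this]
        exact hagree p (List.mem_cons_of_mem _ hp)
      obtain ⟨ihl, ihg⟩ := ih g g'' (acc ++ [k]) hnd' hagree'
      refine ⟨?_, fun p => ?_⟩
      · rw [ihl, List.filter_cons, if_pos (by simpa [hk] using hle)]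
        simp
      · rw [ihg p]
        by_cases hp : p ∈ ks
        · rw [if_pos hp, if_pos (List.mem_cons_of_mem _ hp)]
        · rw [if_neg hp]
          by_cases hpk : p = k
          · subst hpk
            rw [if_pos (List.mem_cons_self ..), hg'']
            have hgle : g p ≤ h p := by rwa [← hk]
            simp [hgle]
          · rw [if_neg (by simp [hpk, hp] : ¬ p ∈ k :: ks), hg'']
            simp [hpk]
    · rw [if_neg hle]
      set g'' : (Int × Int) → Int := fun q => if q = k then g' k - h k else g' q with hg''
      have hagree' : ∀ p ∈ ks, g'' p = g p := by
        intro p hp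
        have : p ≠ k := fun he => hnotin (he ▸ hp)
        simp only [hg'', if_neg this]
        exact hagree p (List.mem_cons_of_mem _ hp)
      obtain ⟨ihl, ihg⟩ := ih g g'' acc hnd' hagree'
      refine ⟨?_, fun p => ?_⟩
      · rw [ihl, List.filter_cons, if_neg (by simpa [hk] using hle)]
      · rw [ihg p]
        by_cases hp : p ∈ ks
        · rw [if_pos hp, if_pos (List.mem_cons_of_mem _ hp)]
        · rw [if_neg hp]
          by_cases hpk : p = k
          · subst hpk
            rw [if_pos (List.mem_cons_self ..), hg'']
            have hgle : ¬ g p ≤ h p := by rwa [← hk]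
            simp [hgle, hk]
          · rw [if_neg (by simp [hpk, hp] : ¬ p ∈ k :: ks), hg'']
            simp [hpk]
lemma pvRoundB_char (N M : Int) (g : (Int × Int) → Int) (F : List (Int × Int)) :
    (∀ p, p ∈ (pvRoundB N M g F).1 ↔
        pvInB N M p ∧ 0 < g p ∧ g p ≤ ((pvEvents F).count p : Int))
    ∧ (pvRoundB N M g F).1.Nodup
    ∧ (∀ p, (pvRoundB N M g F).2 p =
        if pvInB N M p ∧ 0 < g p ∧ p ∈ pvEvents F then
          (if g p ≤ ((pvEvents F).count p : Int) then 0 else g p - (pvEvents F).count p)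
        else g p) := by
  rw [pvRoundB, pvCountB_events]
  set hs := (pvEvents F).foldl (pvEvC N M g) ([], fun _ => 0) with hhs
  obtain ⟨hc1, hc2, hc3⟩ := pvEvC_char N M g (pvEvents F) [] (fun _ => 0)
  rw [← hhs] at hc1 hc2 hc3
  have hnd : hs.1.Nodup := hc3 List.nodup_nil
  obtain ⟨ha1, ha2⟩ := pvApplyB_char hs.2 hs.1 g g [] hnd (fun p _ => rfl)
  have hmemkeys : ∀ p, p ∈ hs.1 ↔ pvInB N M p ∧ 0 < g p ∧ p ∈ pvEvents F := by
    intro p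
    rw [hc2 p]
    simp
  have hcnt : ∀ p, pvInB N M p ∧ 0 < g p → hs.2 p = ((pvEvents F).count p : Int) := by
    intro p hp
    rw [hc1 p, if_pos hp]
    simp
  refine ⟨fun p => ?_, ?_, fun p => ?_⟩
  · rw [ha1]
    simp only [List.nil_append, List.mem_filter, decide_eq_true_eq]
    constructor
    · rintro ⟨hin, hle⟩
      obtain ⟨hb, hpos, hmem⟩ := (hmemkeys p).1 hin
      exact ⟨hb, hpos, by rwa [hcnt p ⟨hb, hpos⟩] at hle⟩
    · rintro ⟨hb, hpos, hle⟩
      have hmem : p ∈ pvEvents F := by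
        rw [← List.count_pos_iff]
        by_contra hcz
        have : (pvEvents F).count p = 0 := by omega
        rw [this] at hle
        push_cast at hle
        omega
      exact ⟨(hmemkeys p).2 ⟨hb, hpos, hmem⟩, by rw [hcnt p ⟨hb, hpos⟩]; exact hle⟩
  · rw [ha1]
    simp only [List.nil_append]
    exact List.Nodup.filter _ hnd
  · rw [ha2 p]
    by_cases hin : p ∈ hs.1
    · obtain ⟨hb, hpos, hmem⟩ := (hmemkeys p).1 hin
      rw [if_pos hin, hcnt p ⟨hb, hpos⟩, if_pos (show pvInB N M p ∧ 0 < g p ∧ p ∈ pvEvents F from ⟨hb, hpos, hmem⟩)]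
    · rw [if_neg hin, if_neg (fun hx => hin ((hmemkeys p).2 hx))]
lemma pvMem_region (N M : Int) (p : Int × Int) : p ∈ pvRegion N M ↔ pvInB N M p := by
  simp only [pvRegion, Finset.mem_product, Finset.mem_Icc, pvInB]
  omega

lemma pvRegion_card (N M : Int) : (pvRegion N M).card = N.toNat * M.toNat := by
  rw [pvRegion, Finset.card_product, Int.card_Icc, Int.card_Icc]
  congr 1 <;> omega

lemma pvPos_drop (N M : Int) (g G : (Int × Int) → Int) (S : List (Int × Int))
    (hS : S.Nodup)
    (hmem : ∀ p, p ∈ S → pvInB N M p ∧ 0 < g p)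
    (hG : ∀ p, p ∈ pvRegion N M → (0 < G p ↔ (0 < g p ∧ p ∉ S))) :
    pvPos N M G + S.length = pvPos N M g := by
  have hsub : S.toFinset ⊆ (pvRegion N M).filter (fun p => 0 < g p) := by
    intro p hp
    rw [List.mem_toFinset] at hp
    obtain ⟨hb, hpos⟩ := hmem p hp
    exact Finset.mem_filter.mpr ⟨(pvMem_region N M p).mpr hb, hpos⟩
  have heq : (pvRegion N M).filter (fun p => 0 < G p)
      = ((pvRegion N M).filter (fun p => 0 < g p)) \ S.toFinset := by
    ext p
    simp only [Finset.mem_filter, Finset.mem_sdiff, List.mem_toFinset]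
    constructor
    · rintro ⟨hr, hpos⟩
      obtain ⟨h1, h2⟩ := (hG p hr).1 hpos
      exact ⟨⟨hr, h1⟩, h2⟩
    · rintro ⟨⟨hr, h1⟩, h2⟩
      exact ⟨hr, (hG p hr).2 ⟨h1, h2⟩⟩
  have hcard : S.toFinset.card = S.length := List.toFinset_card_of_nodup hS
  have hint : S.toFinset ∩ ((pvRegion N M).filter (fun p => 0 < g p)) = S.toFinset :=
    Finset.inter_eq_left.mpr hsub
  have hsd := Finset.card_sdiff (s := S.toFinset)
    (t := (pvRegion N M).filter (fun p => 0 < g p))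
  rw [hint, hcard] at hsd
  have hle := Finset.card_le_card hsub
  rw [hcard] at hle
  rw [pvPos, pvPos, heq, hsd]
  omega

lemma pvRunA_nil (fuel : Nat) (N M : Int) (g : (Int × Int) → Int) (mt : Int) :
    pvRunA fuel N M g [] mt = mt := by
  cases fuel <;> rfl

lemma pvRunA_cons (fuel : Nat) (N M : Int) (g : (Int × Int) → Int)
    (r c time : Int) (rest : List (Int × Int × Int)) (mt : Int) :
    pvRunA (fuel + 1) N M g ((r, c, time) :: rest) mt =
      pvRunA fuel N M (pvStepA N M (g, []) r c time).1
        (rest ++ (pvStepA N M (g, []) r c time).2) (max mt time) := rfl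

lemma pvRunB_nil (fuel : Nat) (N M : Int) (g : (Int × Int) → Int) (t last : Int) :
    pvRunB fuel N M g [] t last = last := by
  cases fuel <;> rfl

lemma pvRunB_cons (fuel : Nat) (N M : Int) (g : (Int × Int) → Int)
    (q : Int × Int) (rest : List (Int × Int)) (t last : Int) :
    pvRunB (fuel + 1) N M g (q :: rest) t last =
      pvRunB fuel N M (pvRoundB N M g (q :: rest)).2 (pvRoundB N M g (q :: rest)).1
        (t + 1) (max last t) := rfl

lemma pvRunA_level (N M : Int) (t : Int) :
    ∀ (F : List (Int × Int)) (fuel : Nat) (g : (Int × Int) → Int)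
      (P : List (Int × Int)) (mt : Int), F.length ≤ fuel →
    pvRunA fuel N M g
        (F.map (fun p => (p.1, p.2, t)) ++ P.map (fun p => (p.1, p.2, t + 1))) mt
      = pvRunA (fuel - F.length) N M ((pvEvents F).foldl (pvEvA N M) (g, [])).1
          ((P ++ ((pvEvents F).foldl (pvEvA N M) (g, [])).2).map (fun p => (p.1, p.2, t + 1)))
          (if F = [] then mt else max mt t) := by
  intro F
  induction F with
  | nil =>
    intro fuel g P mt _
    simp [pvEvents]
  | cons rc F ih =>
    intro fuel g P mt hf
    obtain ⟨fu, rfl⟩ : ∃ fu, fuel = fu + 1 := by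
      cases fuel
      · simp at hf
      · exact ⟨_, rfl⟩
    obtain ⟨r, c⟩ := rc
    simp only [List.map_cons, List.cons_append]
    rw [pvRunA_cons, pvStepA_eq]
    dsimp only
    rw [List.nil_append, List.append_assoc, ← List.map_append]
    rw [ih fu _ _ _ (by simpa using hf)]
    have hev : pvEvents ((r, c) :: F) = pvHits (r, c) ++ pvEvents F := by
      rw [pvEvents, List.flatMap_cons, pvEvents]
    rw [hev, List.foldl_append,
      pvEvA_acc N M (pvEvents F) ((pvHits (r, c)).foldl (pvEvA N M) (g, [])).1
        ((pvHits (r, c)).foldl (pvEvA N M) (g, [])).2]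
    dsimp only
    have harith : fu + 1 - (((r, c) :: F).length) = fu - F.length := by
      simp only [List.length_cons]; omega
    rw [harith]
    have hmt : (if F = [] then max mt t else max (max mt t) t) = max mt t := by
      split
      · rfl
      · rw [max_assoc, max_self]
    rw [hmt, if_neg (List.cons_ne_nil _ _), ← List.append_assoc]
lemma pvInv_pos (gA gB : (Int × Int) → Int) (h : pvInv gA gB) (p : Int × Int) :
    0 < gA p ↔ 0 < gB p := by
  rcases lt_trichotomy (gB p) 0 with hlt | heq | hgt
  · have := (h p).2.2 hlt; omega
  · have := (h p).2.1 heq; omega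
  · have := (h p).1 hgt; omega

lemma pvRound_inv (N M : Int) (gA gB : (Int × Int) → Int) (FA FB : List (Int × Int))
    (hinv : pvInv gA gB) (hperm : FA.Perm FB) :
    ((pvEvents FA).foldl (pvEvA N M) (gA, [])).2.Perm (pvRoundB N M gB FB).1
    ∧ pvInv ((pvEvents FA).foldl (pvEvA N M) (gA, [])).1 (pvRoundB N M gB FB).2 := by
  have hpe : (pvEvents FA).Perm (pvEvents FB) := List.Perm.flatMap_right pvHits hperm
  have hcnt : ∀ p, (pvEvents FA).count p = (pvEvents FB).count p := fun p => hpe.count_eq p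
  obtain ⟨a1, a2, a3⟩ := pvEvA_char N M (pvEvents FA) gA
  obtain ⟨b1, b2, b3⟩ := pvRoundB_char N M gB FB
  constructor
  · refine (List.perm_ext_iff_of_nodup a3 b2).mpr fun p => ?_
    rw [a2 p, b1 p, hcnt p]
    constructor
    · rintro ⟨hb, hpos, hle⟩
      have hposB : 0 < gB p := (pvInv_pos gA gB hinv p).1 hpos
      have heq := (hinv p).1 hposB
      exact ⟨hb, hposB, by rwa [heq] at hle⟩
    · rintro ⟨hb, hposB, hle⟩
      have heq := (hinv p).1 hposB
      exact ⟨hb, by omega, by rwa [← heq] at hle⟩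
  · intro p
    by_cases hb : pvInB N M p
    · rw [a1 p, if_pos hb, b3 p, hcnt p]
      by_cases hmem : p ∈ pvEvents FB
      · have hkpos : 0 < (pvEvents FB).count p := List.count_pos_iff.mpr hmem
        by_cases hposB : 0 < gB p
        · have heq : gA p = gB p := (hinv p).1 hposB
          rw [if_pos (show pvInB N M p ∧ 0 < gB p ∧ p ∈ pvEvents FB from ⟨hb, hposB, hmem⟩)]
          unfold pvApplyK
          refine ⟨?_, ?_, ?_⟩ <;> split_ifs <;> omega
        · rw [if_neg (fun hx => hposB hx.2.1)]
          have h2 := (hinv p).2.1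
          have h3 := (hinv p).2.2
          unfold pvApplyK
          refine ⟨?_, ?_, ?_⟩ <;> split_ifs <;> omega
      · have hk0 : (pvEvents FB).count p = 0 := List.count_eq_zero.mpr hmem
        rw [if_neg (fun hx => hmem hx.2.2), hk0]
        have h1 := (hinv p).1
        have h2 := (hinv p).2.1
        have h3 := (hinv p).2.2
        unfold pvApplyK
        refine ⟨?_, ?_, ?_⟩ <;> split_ifs <;> omega
    · rw [a1 p, if_neg hb, b3 p, if_neg (fun hx => hb hx.1)]
      exact hinv p

lemma pvPos_roundB (N M : Int) (gB : (Int × Int) → Int) (FB : List (Int × Int)) :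
    pvPos N M (pvRoundB N M gB FB).2 + (pvRoundB N M gB FB).1.length = pvPos N M gB := by
  obtain ⟨b1, b2, b3⟩ := pvRoundB_char N M gB FB
  refine pvPos_drop N M gB _ _ b2 (fun p hp => ?_) (fun p hr => ?_)
  · obtain ⟨hb, hpos, _⟩ := (b1 p).1 hp
    exact ⟨hb, hpos⟩
  · have hb := (pvMem_region N M p).1 hr
    rw [b3 p]
    by_cases hmem : p ∈ pvEvents FB
    · have hkpos : 0 < (pvEvents FB).count p := List.count_pos_iff.mpr hmem
      by_cases hpos : 0 < gB p
      · rw [if_pos (show pvInB N M p ∧ 0 < gB p ∧ p ∈ pvEvents FB from ⟨hb, hpos, hmem⟩)]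
        constructor
        · intro hG
          split_ifs at hG with hle
          · omega
          · exact ⟨hpos, fun hs => hle ((b1 p).1 hs).2.2⟩
        · rintro ⟨-, hns⟩
          rw [if_neg (fun hle => hns ((b1 p).2 ⟨hb, hpos, hle⟩))]
          have hne : ¬ gB p ≤ ((pvEvents FB).count p : Int) :=
            fun hle => hns ((b1 p).2 ⟨hb, hpos, hle⟩)
          omega
      · rw [if_neg (fun hx => hpos hx.2.1)]
        constructor
        · intro hG; exact absurd hG hpos
        · rintro ⟨hG, -⟩; exact hG
    · have hk0 : (pvEvents FB).count p = 0 := List.count_eq_zero.mpr hmem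
      rw [if_neg (fun hx => hmem hx.2.2)]
      constructor
      · intro hG
        refine ⟨hG, fun hs => ?_⟩
        have := ((b1 p).1 hs).2.2
        rw [hk0] at this
        push_cast at this
        omega
      · rintro ⟨hG, -⟩; exact hG
lemma pvInv_refl (g : (Int × Int) → Int) : pvInv g g :=
  fun _ => ⟨fun _ => rfl, fun h => h, fun h => h⟩

lemma pvPos_le (N M : Int) (g : (Int × Int) → Int) : pvPos N M g ≤ N.toNat * M.toNat := by
  rw [pvPos, ← pvRegion_card N M]
  exact Finset.card_filter_le _ _

lemma pvMain (N M : Int) : ∀ (n : Nat) (gA gB : (Int × Int) → Int)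
    (FA FB : List (Int × Int)) (t mt : Int) (fA fB : Nat),
    pvInv gA gB → FA.Perm FB → pvPos N M gB ≤ n →
    FA.length + 2 * pvPos N M gB ≤ fA → pvPos N M gB + 2 ≤ fB →
    pvRunA fA N M gA (FA.map (fun p => (p.1, p.2, t))) mt = pvRunB fB N M gB FB t mt := by
  intro n
  induction n with
  | zero =>
    intro gA gB FA FB t mt fA fB hinv hperm hpos hfA hfB
    cases FA with
    | nil =>
      have hFB : FB = [] := List.Perm.eq_nil hperm.symm
      subst hFB
      rw [pvRunB_nil, List.map_nil, pvRunA_nil]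
    | cons hd tl =>
      cases FB with
      | nil => exact absurd (List.Perm.eq_nil hperm) (List.cons_ne_nil hd tl)
      | cons q rest =>
        obtain ⟨fB', rfl⟩ : ∃ fB', fB = fB' + 1 := ⟨fB - 1, by omega⟩
        rw [pvRunB_cons]
        have hlev := pvRunA_level N M t (hd :: tl) fA gA [] mt (by
          simp only [List.length_cons] at hfA ⊢; omega)
        simp only [List.map_nil, List.append_nil, List.nil_append] at hlev
        rw [hlev, if_neg (List.cons_ne_nil hd tl)]
        have hdrop := pvPos_roundB N M gB (q :: rest)
        have hlen0 : (pvRoundB N M gB (q :: rest)).1.length = 0 := by omega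
        have hFnil : (pvRoundB N M gB (q :: rest)).1 = [] :=
          List.length_eq_zero_iff.mp hlen0
        obtain ⟨hperm', _⟩ := pvRound_inv N M gA gB (hd :: tl) (q :: rest) hinv hperm
        rw [hFnil] at hperm' ⊢
        have : ((pvEvents (hd :: tl)).foldl (pvEvA N M) (gA, [])).2 = [] :=
          List.Perm.eq_nil hperm'
        rw [this, List.map_nil, pvRunA_nil, pvRunB_nil]
  | succ n ih =>
    intro gA gB FA FB t mt fA fB hinv hperm hpos hfA hfB
    cases FA with
    | nil =>
      have hFB : FB = [] := List.Perm.eq_nil hperm.symm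
      subst hFB
      rw [pvRunB_nil, List.map_nil, pvRunA_nil]
    | cons hd tl =>
      cases FB with
      | nil => exact absurd (List.Perm.eq_nil hperm) (List.cons_ne_nil hd tl)
      | cons q rest =>
        obtain ⟨fB', rfl⟩ : ∃ fB', fB = fB' + 1 := ⟨fB - 1, by omega⟩
        rw [pvRunB_cons]
        have hlev := pvRunA_level N M t (hd :: tl) fA gA [] mt (by
          simp only [List.length_cons] at hfA ⊢; omega)
        simp only [List.map_nil, List.append_nil, List.nil_append] at hlev
        rw [hlev, if_neg (List.cons_ne_nil hd tl)]
        obtain ⟨hperm', hinv'⟩ := pvRound_inv N M gA gB (hd :: tl) (q :: rest) hinv hperm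
        have hdrop := pvPos_roundB N M gB (q :: rest)
        have hlellen := List.Perm.length_eq hperm'
        cases hF' : (pvRoundB N M gB (q :: rest)).1 with
        | nil =>
          rw [hF'] at hperm'
          have hnilA : ((pvEvents (hd :: tl)).foldl (pvEvA N M) (gA, [])).2 = [] :=
            List.Perm.eq_nil hperm'
          rw [hnilA, List.map_nil, pvRunA_nil, pvRunB_nil]
        | cons q' rest' =>
          rw [← hF']
          refine ih ((pvEvents (hd :: tl)).foldl (pvEvA N M) (gA, [])).1
            (pvRoundB N M gB (q :: rest)).2
            ((pvEvents (hd :: tl)).foldl (pvEvA N M) (gA, [])).2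
            (pvRoundB N M gB (q :: rest)).1 (t + 1) (max mt t)
            (fA - (hd :: tl).length) fB' hinv' hperm' ?_ ?_ ?_
          · have hlen1 : 1 ≤ (pvRoundB N M gB (q :: rest)).1.length := by
              rw [hF']; simp
            omega
          · simp only [List.length_cons] at hfA ⊢
            omega
          · have hlen1 : 1 ≤ (pvRoundB N M gB (q :: rest)).1.length := by
              rw [hF']; simp
            omega

lemma pvParse_rel (N M : Int) (arr : List (List String)) :
    pvParseA N M arr =
      ((pvParseB N M arr).1, (pvParseB N M arr).2.map (fun p => (p.1, p.2, (0 : Int)))) := by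
  rw [pvParseA, pvParseB]
  have hinner : ∀ (r : Int) (cs : List Int) (g : (Int × Int) → Int)
      (Q : List (Int × Int × Int)) (F : List (Int × Int)),
      Q = F.map (fun p => (p.1, p.2, (0 : Int))) →
      cs.foldl (fun (st : ((Int × Int) → Int) × List (Int × Int × Int)) c =>
        let s := (PySem.List.pyGet? ((PySem.List.pyGet? arr r).getD []) c).getD ""
        if s = "." then
          ((fun p => if p = (r, c) then 0 else st.1 p), st.2 ++ [(r, c, (0 : Int))])
        else
          ((fun p => if p = (r, c) then (PySem.Int.ofStr? s).getD 0 else st.1 p), st.2)) (g, Q)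
      = ((cs.foldl (fun (st : ((Int × Int) → Int) × List (Int × Int)) c =>
            let s := (PySem.List.pyGet? ((PySem.List.pyGet? arr r).getD []) c).getD ""
            if s = "." then
              ((fun p => if p = (r, c) then 0 else st.1 p), st.2 ++ [(r, c)])
            else
              ((fun p => if p = (r, c) then (PySem.Int.ofStr? s).getD 0 else st.1 p), st.2)) (g, F)).1,
         ((cs.foldl (fun (st : ((Int × Int) → Int) × List (Int × Int)) c =>
            let s := (PySem.List.pyGet? ((PySem.List.pyGet? arr r).getD []) c).getD ""
            if s = "." then
              ((fun p => if p = (r, c) then 0 else st.1 p), st.2 ++ [(r, c)])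
            else
              ((fun p => if p = (r, c) then (PySem.Int.ofStr? s).getD 0 else st.1 p), st.2)) (g, F)).2).map
           (fun p => (p.1, p.2, (0 : Int)))) := by
    intro r cs
    induction cs with
    | nil => intro g Q F hQF; simpa using hQF
    | cons c cs ihc =>
      intro g Q F hQF
      simp only [List.foldl_cons]
      by_cases hs : (PySem.List.pyGet? ((PySem.List.pyGet? arr r).getD []) c).getD "" = "."
      · rw [if_pos hs, if_pos hs]
        refine ihc _ _ _ ?_
        rw [hQF, List.map_append]
        rfl
      · rw [if_neg hs, if_neg hs]
        exact ihc _ _ _ hQF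
  have houter : ∀ (rows : List Int) (g : (Int × Int) → Int)
      (Q : List (Int × Int × Int)) (F : List (Int × Int)),
      Q = F.map (fun p => (p.1, p.2, (0 : Int))) →
      rows.foldl (fun st r =>
        (PySem.List.pyRange 0 M 1).foldl (fun (st : ((Int × Int) → Int) × List (Int × Int × Int)) c =>
          let s := (PySem.List.pyGet? ((PySem.List.pyGet? arr r).getD []) c).getD ""
          if s = "." then
            ((fun p => if p = (r, c) then 0 else st.1 p), st.2 ++ [(r, c, (0 : Int))])
          else
            ((fun p => if p = (r, c) then (PySem.Int.ofStr? s).getD 0 else st.1 p), st.2)) st) (g, Q)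
      = ((rows.foldl (fun st r =>
            (PySem.List.pyRange 0 M 1).foldl (fun (st : ((Int × Int) → Int) × List (Int × Int)) c =>
              let s := (PySem.List.pyGet? ((PySem.List.pyGet? arr r).getD []) c).getD ""
              if s = "." then
                ((fun p => if p = (r, c) then 0 else st.1 p), st.2 ++ [(r, c)])
              else
                ((fun p => if p = (r, c) then (PySem.Int.ofStr? s).getD 0 else st.1 p), st.2)) st) (g, F)).1,
         ((rows.foldl (fun st r =>
            (PySem.List.pyRange 0 M 1).foldl (fun (st : ((Int × Int) → Int) × List (Int × Int)) c =>
              let s := (PySem.List.pyGet? ((PySem.List.pyGet? arr r).getD []) c).getD ""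
              if s = "." then
                ((fun p => if p = (r, c) then 0 else st.1 p), st.2 ++ [(r, c)])
              else
                ((fun p => if p = (r, c) then (PySem.Int.ofStr? s).getD 0 else st.1 p), st.2)) st) (g, F)).2).map
           (fun p => (p.1, p.2, (0 : Int)))) := by
    intro rows
    induction rows with
    | nil => intro g Q F hQF; simpa using hQF
    | cons r rows ihr =>
      intro g Q F hQF
      simp only [List.foldl_cons]
      rw [hinner r _ g Q F hQF]
      exact ihr _ _ _ rfl
  exact houter _ _ _ _ rfl

-- ===== VERDICT (by name: the statement is the Claim_ definition above) =====
theorem sandcastle_spec : Claim_equal_sandcastle := by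
  intro N M arr _ _
  unfold Spec_sandcastle
  rw [sandcastle, sandcastle_alt, pvParse_rel]
  dsimp only
  rw [List.length_map]
  refine pvMain N M (pvPos N M (pvParseB N M arr).1) (pvParseB N M arr).1 (pvParseB N M arr).1
    (pvParseB N M arr).2 (pvParseB N M arr).2 0 0 _ _
    (pvInv_refl _) (List.Perm.refl _) le_rfl ?_ ?_
  · have := pvPos_le N M (pvParseB N M arr).1
    omega
  · have := pvPos_le N M (pvParseB N M arr).1
    omega
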